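-- pv_equiv track=rewrite | github.com/sangaline/dodona | glazed.py | SwapGenes
-- ===== SOURCE A (Python) =====
-- def SwapGenes(keyBoard_A, keyBoard_B, co_index):
--     keyBoard_A = [a for a in keyBoard_A]
--     keyBoard_B = [b for b in keyBoard_B]
--
--     newGenesA = keyBoard_B[0:co_index] #the new genes to be swapped into chromosome A
--     newGenesB = keyBoard_A[0:co_index] #   "           "            "  chromosome B
--
--     oldGenesA = keyBoard_A[co_index:len(keyBoard_A)] #the unnaffected genes from chromosome A
--     oldGenesB = keyBoard_B[co_index:len(keyBoard_B)] # "      "          "       chromosome B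
--
--     newChromeA = newGenesA+oldGenesA
--     newChromeB = newGenesB+oldGenesB
--
--     swpCommon = list(set(newGenesA)&set(newGenesB))  #find any genes that were swapped from both chromosomes
--     for i in range(len(swpCommon)):              #remove the swapped letters that each chromosome had in common from the list of letters that
--         newGenesA.remove(swpCommon[i])           #still need to be swapped.  This is because with every letter we swap we end up with a duplicate
--         newGenesB.remove(swpCommon[i])           #in the new chromosome so we need to remove the duplicates from both chromosomes simply by swapping them but
--                                                  #if the same letter is present in both swapped genes then no duplicates will be created.
--
--     swpPairs = []
--     for i in range(len(newGenesA)):                    #This pairs the remaining swapped letters so we can take are of the duplicates easily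
--         swpPairs.append((newGenesA[i],newGenesB[i]))
--
--
--     tmpChromeA = newChromeA[co_index:len(newChromeA)]
--     tmpChromeB = newChromeB[co_index:len(newChromeB)]
--     for i in range(len(swpPairs)):                                                     #For every pair of duplicates
--         tmpChromeA = [swpPairs[i][1] if x==swpPairs[i][0] else x for x in tmpChromeA]  #Find the duplicate (after the co_index) and swap it with it's pair
--         tmpChromeB = [swpPairs[i][0] if x==swpPairs[i][1] else x for x in tmpChromeB]
--
--     finalChromeA = newChromeA[0:co_index]+tmpChromeA
--     finalChromeB = newChromeB[0:co_index]+tmpChromeB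
--
--     return finalChromeA, finalChromeB
-- ===== SOURCE B (Python) =====
-- def _skip_first(lst, values):
--     # drop the first occurrence of each value in `values` (a set), keep everything else
--     pending = set(values)
--     out = []
--     for x in lst:
--         if x in pending:
--             pending.discard(x)
--         else:
--             out.append(x)
--     return out
--
-- def SwapGenes(keyBoard_A, keyBoard_B, co_index):
--     A = list(keyBoard_A)
--     B = list(keyBoard_B)
--     headA, headB = A[:co_index], B[:co_index]
--     chromeA = headB + A[co_index:]
--     chromeB = headA + B[co_index:]
--     common = set(headB) & set(headA)
--     gA = _skip_first(headB, common)
--     gB = _skip_first(headA, common)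
--     # composed substitution maps, built back-to-front: FA[x] is where x finally goes on the A side
--     FA, FB = {}, {}
--     for a, b in reversed(list(zip(gA, gB))):
--         FA[a] = FA.get(b, b)
--         FB[b] = FB.get(a, a)
--     preA, postA = chromeA[:co_index], chromeA[co_index:]
--     preB, postB = chromeB[:co_index], chromeB[co_index:]
--     return preA + [FA.get(x, x) for x in postA], preB + [FB.get(x, x) for x in postB]
-- ===== Notes on version B (the rewrite author's own statement) =====
-- stated objective: faster
-- what changed: A fixes duplicates with a list.remove loop and one full substitution pass over both chromosome tails per swapped pair; B removes common genes in one seen-set pass and precomputes the composed substitution mapping in a dict built back-to-front over the pairs, applying it in a single pass per chromosome.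
import Mathlib
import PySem

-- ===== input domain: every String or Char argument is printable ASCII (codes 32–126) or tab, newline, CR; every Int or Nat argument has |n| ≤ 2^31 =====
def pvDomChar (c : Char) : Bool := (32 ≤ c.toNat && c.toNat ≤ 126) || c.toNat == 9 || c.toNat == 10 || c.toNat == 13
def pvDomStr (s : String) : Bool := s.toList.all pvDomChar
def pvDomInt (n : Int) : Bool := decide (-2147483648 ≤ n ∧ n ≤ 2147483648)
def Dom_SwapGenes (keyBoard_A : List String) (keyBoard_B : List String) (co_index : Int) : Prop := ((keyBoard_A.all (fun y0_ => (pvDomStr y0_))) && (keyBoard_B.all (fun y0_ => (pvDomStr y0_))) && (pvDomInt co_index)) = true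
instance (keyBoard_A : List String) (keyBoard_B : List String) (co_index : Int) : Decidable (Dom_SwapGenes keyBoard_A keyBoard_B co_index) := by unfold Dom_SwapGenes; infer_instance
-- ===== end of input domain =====

-- B replaces A's per-pair full-list substitution passes and list.remove loop by one composed
-- substitution dict (built back-to-front) applied in a single pass; objective: faster.

-- ===== PORT A =====
-- Python's list.remove raises ValueError when the value is absent; in SwapGenes every removed
-- value is present (it comes from the intersection of the two lists), so the getD fallback
-- branch is unreachable on inputs A accepts.
def pvRemoveA (l : List String) (s : String) : List String := (PySem.List.remove? l s).getD l

def SwapGenes (keyBoard_A : List String) (keyBoard_B : List String) (co_index : Int) : List String × List String :=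
  let newGenesA := PySem.List.slice keyBoard_B (some 0) (some co_index)
  let newGenesB := PySem.List.slice keyBoard_A (some 0) (some co_index)
  let oldGenesA := PySem.List.slice keyBoard_A (some co_index) (some (keyBoard_A.length : Int))
  let oldGenesB := PySem.List.slice keyBoard_B (some co_index) (some (keyBoard_B.length : Int))
  let newChromeA := newGenesA ++ oldGenesA
  let newChromeB := newGenesB ++ oldGenesB
  let swpCommon : PySem.Set String := PySem.Set.inter (PySem.Set.ofList newGenesA) (PySem.Set.ofList newGenesB)
  -- 'for i in range(len(swpCommon)): …remove(swpCommon[i])' visits swpCommon's elements in order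
  let gs := swpCommon.foldl (fun (p : List String × List String) s => (pvRemoveA p.1 s, pvRemoveA p.2 s)) (newGenesA, newGenesB)
  -- 'for i in range(len(newGenesA)): swpPairs.append((newGenesA[i], newGenesB[i]))'; the index i
  -- is a Nat in range for gs.1; for gs.2 Python raises IndexError when i ≥ len(gs.2) — those
  -- inputs are excluded by Pre_, so the getD default is unreachable inside Pre_.
  let swpPairs := (List.range gs.1.length).foldl (fun acc i => acc ++ [(gs.1.getD i "", gs.2.getD i "")]) ([] : List (String × String))
  let tmp0A := PySem.List.slice newChromeA (some co_index) (some (newChromeA.length : Int))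
  let tmp0B := PySem.List.slice newChromeB (some co_index) (some (newChromeB.length : Int))
  let tmps := swpPairs.foldl (fun (p : List String × List String) pr =>
      (p.1.map (fun x => if x == pr.1 then pr.2 else x),
       p.2.map (fun x => if x == pr.2 then pr.1 else x))) (tmp0A, tmp0B)
  (PySem.List.slice newChromeA (some 0) (some co_index) ++ tmps.1,
   PySem.List.slice newChromeB (some 0) (some co_index) ++ tmps.2)

-- ===== PORT B =====
-- Source B's _skip_first: drop the first occurrence of each value of `values`, keep everything else.
def pvSkipFirst (l : List String) (values : PySem.Set String) : List String :=
  (l.foldl (fun (st : PySem.Set String × List String) x =>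
      if PySem.Set.contains st.1 x then (PySem.Set.discard st.1 x, st.2)
      else (st.1, st.2 ++ [x])) (values, ([] : List String))).2

def SwapGenes_alt (keyBoard_A : List String) (keyBoard_B : List String) (co_index : Int) : List String × List String :=
  let headA := PySem.List.slice keyBoard_A none (some co_index)
  let headB := PySem.List.slice keyBoard_B none (some co_index)
  let chromeA := headB ++ PySem.List.slice keyBoard_A (some co_index) none
  let chromeB := headA ++ PySem.List.slice keyBoard_B (some co_index) none
  let common := PySem.Set.inter (PySem.Set.ofList headB) (PySem.Set.ofList headA)
  let gA := pvSkipFirst headB common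
  let gB := pvSkipFirst headA common
  -- composed substitution maps, built back-to-front over reversed(list(zip(gA, gB)))
  let Fs := (gA.zip gB).reverse.foldl
      (fun (Fp : PySem.Dict String String × PySem.Dict String String) pr =>
        (Fp.1.insert pr.1 (Fp.1.getD pr.2 pr.2), Fp.2.insert pr.2 (Fp.2.getD pr.1 pr.1)))
      (PySem.Dict.empty, PySem.Dict.empty)
  let preA := PySem.List.slice chromeA none (some co_index)
  let postA := PySem.List.slice chromeA (some co_index) none
  let preB := PySem.List.slice chromeB none (some co_index)
  let postB := PySem.List.slice chromeB (some co_index) none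
  (preA ++ postA.map (fun x => Fs.1.getD x x), preB ++ postB.map (fun x => Fs.2.getD x x))

-- ===== PRECONDITION & SPEC =====
-- pvSliceLen n c = the length of xs[0:c] for a list of length n (Python slice clamping).
def pvSliceLen (n : Int) (c : Int) : Int := max 0 (min (if c < 0 then n + c else c) n)

-- Pre_ excludes exactly the inputs where Python A raises IndexError: when the swapped-in prefix
-- of B is longer than that of A (after removing the common genes), newGenesB[i] runs out.
def Pre_SwapGenes (keyBoard_A : List String) (keyBoard_B : List String) (co_index : Int) : Prop :=
  pvSliceLen (keyBoard_B.length : Int) co_index ≤ pvSliceLen (keyBoard_A.length : Int) co_index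
instance (keyBoard_A : List String) (keyBoard_B : List String) (co_index : Int) : Decidable (Pre_SwapGenes keyBoard_A keyBoard_B co_index) := by unfold Pre_SwapGenes; infer_instance

def pvWitness_SwapGenes : List String × List String × Int := (["a", "b", "c"], ["b", "d", "c"], 2)

def Spec_SwapGenes (keyBoard_A : List String) (keyBoard_B : List String) (co_index : Int) (out : List String × List String) : Prop := out = SwapGenes_alt keyBoard_A keyBoard_B co_index
instance (keyBoard_A : List String) (keyBoard_B : List String) (co_index : Int) (out : List String × List String) : Decidable (Spec_SwapGenes keyBoard_A keyBoard_B co_index out) := by unfold Spec_SwapGenes; infer_instance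

-- ===== CLAIM (what is proved, stated in full; the proofs are below) =====
def Claim_equal_SwapGenes : Prop := ∀ (keyBoard_A : List String) (keyBoard_B : List String) (co_index : Int), Dom_SwapGenes keyBoard_A keyBoard_B co_index → Pre_SwapGenes keyBoard_A keyBoard_B co_index → Spec_SwapGenes keyBoard_A keyBoard_B co_index (SwapGenes keyBoard_A keyBoard_B co_index)

-- ===== LEMMAS AND PROOFS =====

theorem pvRemoveA_eq_erase (l : List String) (s : String) : pvRemoveA l s = l.erase s := by
  unfold pvRemoveA
  by_cases h : s ∈ l
  · rw [PySem.List.remove?_eq_some_erase l s h]; rfl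
  · rw [(PySem.List.remove?_eq_none_iff l s).mpr h, List.erase_of_not_mem h]; rfl

theorem foldl_erase_nil (S : List String) : S.foldl List.erase [] = [] := by
  induction S with
  | nil => rfl
  | cons s S ih => simpa using ih

theorem foldl_erase_cons (S : List String) (x : String) (l : List String) :
    S.foldl List.erase (x :: l) =
      if x ∈ S then (S.erase x).foldl List.erase l else x :: S.foldl List.erase l := by
  induction S generalizing l with
  | nil => simp
  | cons s S ih =>
    by_cases hxs : x = s
    · subst hxs
      simp [List.erase_cons_head]
    · have hbe : (x == s) = false := by simp [hxs]
      have hbe' : (s == x) = false := by simp [Ne.symm hxs]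
      simp only [List.foldl_cons, List.erase_cons, hbe, hbe', Bool.false_eq_true, if_false]
      rw [ih]
      by_cases hx : x ∈ S
      · simp [hx, hxs]
      · simp [hx, hxs]

-- reference recursion for B's skip-first pass (proof-side helper)
def pvGo : List String → PySem.Set String → List String
  | [], _ => []
  | x :: l, P => if PySem.Set.contains P x then pvGo l (PySem.Set.discard P x) else x :: pvGo l P

theorem pvSkipFirst_foldl (l : List String) (P : PySem.Set String) (out : List String) :
    (l.foldl (fun (st : PySem.Set String × List String) x =>
      if PySem.Set.contains st.1 x then (PySem.Set.discard st.1 x, st.2)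
      else (st.1, st.2 ++ [x])) (P, out)).2 = out ++ pvGo l P := by
  induction l generalizing P out with
  | nil => simp [pvGo]
  | cons x l ih =>
    simp only [List.foldl_cons]
    by_cases h : PySem.Set.contains P x
    · rw [if_pos h, ih, pvGo, if_pos h]
    · rw [if_neg h, ih, pvGo, if_neg h]
      simp

theorem foldl_erase_eq_pvGo (l : List String) (S : List String) (hS : S.Nodup) :
    S.foldl List.erase l = pvGo l S := by
  induction l generalizing S with
  | nil => simp [pvGo, foldl_erase_nil]
  | cons x l ih =>
    rw [foldl_erase_cons, pvGo]
    by_cases hx : x ∈ S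
    · have hc : PySem.Set.contains S x = true := by simpa [PySem.Set.contains] using hx
      have hd : PySem.Set.discard S x = S.erase x := by
        rw [hS.erase_eq_filter x]
        unfold PySem.Set.discard
        apply List.filter_congr
        intro y _
        simp [bne]
      rw [if_pos hx, if_pos hc, hd, ih _ (hS.erase x)]
    · have hc : ¬ PySem.Set.contains S x = true := by simpa [PySem.Set.contains] using hx
      rw [if_neg hx, if_neg hc, ih _ hS]

theorem length_foldl_erase (S : List String) (l : List String) (hS : S.Nodup)
    (h : ∀ s ∈ S, s ∈ l) : (S.foldl List.erase l).length = l.length - S.length := by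
  induction S generalizing l with
  | nil => simp
  | cons s S ih =>
    simp only [List.foldl_cons]
    have hs : s ∈ l := h s (by simp)
    have hmem : ∀ t ∈ S, t ∈ l.erase s := by
      intro t ht
      have hne : t ≠ s := fun he => (List.nodup_cons.mp hS).1 (he ▸ ht)
      exact (List.mem_erase_of_ne hne).mpr (h t (List.mem_cons_of_mem _ ht))
    rw [ih (l.erase s) (List.nodup_cons.mp hS).2 hmem, List.length_erase_of_mem hs]
    simp only [List.length_cons]
    omega

theorem pairs_eq_zip (gA gB : List String) (h : gA.length ≤ gB.length) :
    (List.range gA.length).foldl (fun acc i => acc ++ [(gA.getD i "", gB.getD i "")]) ([] : List (String × String)) = gA.zip gB := by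
  rw [PySem.List.foldl_append_singleton_eq_map (fun i => (gA.getD i "", gB.getD i "")) (List.range gA.length) []]
  simp only [List.nil_append]
  apply List.ext_getElem
  · simp [List.length_zip]; omega
  · intro i h1 h2
    have hA : i < gA.length := by simpa using h1
    have hB : i < gB.length := by omega
    simp [List.getD_eq_getElem?_getD, hA, hB]

-- A's sequential per-pair substitution passes, per element
def pvSubstFold (key val : String × String → String) (ps : List (String × String)) (x : String) : String :=
  ps.foldl (fun v pr => if v == key pr then val pr else v) x

theorem map_foldl_subst (key val : String × String → String) (ps : List (String × String)) (t0 : List String) :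
    ps.foldl (fun t pr => t.map (fun x => if x == key pr then val pr else x)) t0 =
      t0.map (pvSubstFold key val ps) := by
  induction ps generalizing t0 with
  | nil => unfold pvSubstFold; simp
  | cons pr ps ih =>
    simp only [List.foldl_cons, ih, List.map_map]
    rfl

theorem getD_compose (key val : String × String → String) (ps : List (String × String)) (x : String) :
    ((ps.reverse.foldl (fun (d : PySem.Dict String String) pr => d.insert (key pr) (d.getD (val pr) (val pr))) PySem.Dict.empty).getD x x) = pvSubstFold key val ps x := by
  rw [List.foldl_reverse]
  induction ps generalizing x with
  | nil => simp [pvSubstFold, PySem.Dict.getD, PySem.Dict.get?, PySem.Dict.empty]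
  | cons pr ps ih =>
    simp only [List.foldr_cons, pvSubstFold, List.foldl_cons]
    rw [PySem.Dict.getD_insert]
    by_cases h : x = key pr
    · simp only [h, beq_self_eq_true, if_true]
      exact ih (val pr)
    · simp only [if_neg h, (by simp [h] : (x == key pr) = false), Bool.false_eq_true, if_false]
      exact ih x

theorem slice_to_length (l : List String) (c : Int) :
    PySem.List.slice l (some c) (some (l.length : Int)) = PySem.List.slice l (some c) none := by
  rw [PySem.List.slice_some_none]
  simp only [PySem.List.slice, PySem.List.clampIdx_natCast, min_self]
  apply List.take_of_length_le
  simp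

theorem clampIdx_eq_pvSliceLen (n : Nat) (c : Int) :
    (PySem.List.clampIdx n c : Int) = pvSliceLen (n : Int) c := by
  unfold PySem.List.clampIdx pvSliceLen
  split_ifs with h1 h2 <;> push_cast <;> omega

-- ===== VERDICT (by name: the statement is the Claim_ definition above) =====
theorem pvSkipFirst_eq_pvGo (l : List String) (P : PySem.Set String) :
    pvSkipFirst l P = pvGo l P := by
  unfold pvSkipFirst
  rw [pvSkipFirst_foldl]
  simp

theorem length_slice_to (l : List String) (c : Int) :
    (PySem.List.slice l none (some c)).length = PySem.List.clampIdx l.length c := by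
  simp only [PySem.List.slice]
  simp [min_eq_left (PySem.List.clampIdx_le l.length c)]

theorem SwapGenes_spec : Claim_equal_SwapGenes := by
  intro kA kB c _ hpre
  unfold Spec_SwapGenes SwapGenes SwapGenes_alt
  have hremove : pvRemoveA = List.erase := funext fun l => funext fun s => pvRemoveA_eq_erase l s
  simp only [PySem.List.slice_zero_start, slice_to_length, hremove, PySem.List.foldl_prod_mk,
    pvSkipFirst_eq_pvGo]
  set hA := PySem.List.slice kA none (some c) with hhA
  set hB := PySem.List.slice kB none (some c) with hhB
  set S : PySem.Set String := PySem.Set.inter (PySem.Set.ofList hB) (PySem.Set.ofList hA) with hhS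
  have hSnodup : S.Nodup := (PySem.Set.nodup_ofList hB).filter _
  rw [foldl_erase_eq_pvGo hB S hSnodup, foldl_erase_eq_pvGo hA S hSnodup]
  -- the pairing loop is zip: the A-side list is at most as long as the B-side list
  have hmemB : ∀ s ∈ S, s ∈ hB := fun s hs => (PySem.Set.mem_ofList hB s).mp ((PySem.Set.mem_inter _ _ s).mp hs).1
  have hmemA : ∀ s ∈ S, s ∈ hA := fun s hs => (PySem.Set.mem_ofList hA s).mp ((PySem.Set.mem_inter _ _ s).mp hs).2
  have hlenB : (pvGo hB S).length = hB.length - S.length := by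
    rw [← foldl_erase_eq_pvGo hB S hSnodup]; exact length_foldl_erase S hB hSnodup hmemB
  have hlenA : (pvGo hA S).length = hA.length - S.length := by
    rw [← foldl_erase_eq_pvGo hA S hSnodup]; exact length_foldl_erase S hA hSnodup hmemA
  have hclamp : hB.length ≤ hA.length := by
    rw [hhA, hhB, length_slice_to, length_slice_to]
    have h1 := clampIdx_eq_pvSliceLen kB.length c
    have h2 := clampIdx_eq_pvSliceLen kA.length c
    unfold Pre_SwapGenes at hpre
    omega
  have hle : (pvGo hB S).length ≤ (pvGo hA S).length := by omega
  rw [pairs_eq_zip _ _ hle]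
  have hsplit1 := PySem.List.foldl_prod_mk
        (fun t (pr : String × String) => t.map (fun x => if x == pr.1 then pr.2 else x))
        (fun t pr => t.map (fun x => if x == pr.2 then pr.1 else x))
        ((pvGo hB S).zip (pvGo hA S))
        (PySem.List.slice (hB ++ PySem.List.slice kA (some c)) (some c))
        (PySem.List.slice (hA ++ PySem.List.slice kB (some c)) (some c))
  rw [hsplit1]
  have hsplit2 := PySem.List.foldl_prod_mk
        (fun (d : PySem.Dict String String) (pr : String × String) => d.insert pr.1 (d.getD pr.2 pr.2))
        (fun d pr => d.insert pr.2 (d.getD pr.1 pr.1))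
        (((pvGo hB S).zip (pvGo hA S)).reverse)
        PySem.Dict.empty PySem.Dict.empty
  rw [hsplit2]
  rw [map_foldl_subst Prod.fst Prod.snd, map_foldl_subst Prod.snd Prod.fst]
  have hF1 : (fun x => (((pvGo hB S).zip (pvGo hA S)).reverse.foldl
      (fun (d : PySem.Dict String String) pr => d.insert pr.1 (d.getD pr.2 pr.2)) PySem.Dict.empty).getD x x)
      = pvSubstFold Prod.fst Prod.snd ((pvGo hB S).zip (pvGo hA S)) :=
    funext fun x => getD_compose Prod.fst Prod.snd _ x
  have hF2 : (fun x => (((pvGo hB S).zip (pvGo hA S)).reverse.foldl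
      (fun (d : PySem.Dict String String) pr => d.insert pr.2 (d.getD pr.1 pr.1)) PySem.Dict.empty).getD x x)
      = pvSubstFold Prod.snd Prod.fst ((pvGo hB S).zip (pvGo hA S)) :=
    funext fun x => getD_compose Prod.snd Prod.fst _ x
  rw [hF1, hF2]
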